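-- pv_equiv track=rewrite | github.com/erik-overdahl/adventofcode2022 | day6.py | findMsgStart
-- ===== SOURCE A (Python) =====
-- def findMsgStart(data: str, markerLen: int) -> int:
--     char_pos = {}
--     window_start = 0
--     for window_end in range(len(data)):
--         right = data[window_end]
--         if right in char_pos and char_pos[right] >= window_start:
--             window_start = char_pos[right] + 1
--         char_pos[right] = window_end
--         window_end += 1
--         window_size = window_end - window_start
--         if window_size == markerLen:
--             return window_end
--     return -1
-- ===== SOURCE B (Python) =====
-- def findMsgStart(data: str, markerLen: int) -> int:
--     if markerLen <= 0:
--         return -1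
--     for i in range(markerLen, len(data) + 1):
--         if len(set(data[i - markerLen:i])) == markerLen:
--             return i
--     return -1
-- ===== Notes on version B (the rewrite author's own statement) =====
-- stated objective: simpler
-- what changed: Replaced the sliding-window last-position dict with a direct scan that tests each length-markerLen window for distinctness via len(set(...)), guarded by an up-front markerLen<=0 check.
import Mathlib
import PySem

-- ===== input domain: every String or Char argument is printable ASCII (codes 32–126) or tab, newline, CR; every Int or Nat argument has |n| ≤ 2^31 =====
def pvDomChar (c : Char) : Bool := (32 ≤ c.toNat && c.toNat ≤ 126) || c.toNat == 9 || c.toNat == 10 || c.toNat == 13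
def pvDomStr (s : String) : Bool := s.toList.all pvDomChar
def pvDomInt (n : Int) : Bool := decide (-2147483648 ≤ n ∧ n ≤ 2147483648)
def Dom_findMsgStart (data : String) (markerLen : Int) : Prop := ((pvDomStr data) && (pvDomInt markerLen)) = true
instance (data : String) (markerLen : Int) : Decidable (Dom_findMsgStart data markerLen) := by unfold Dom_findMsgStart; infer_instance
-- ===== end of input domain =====

-- B replaces A's one-pass sliding window (dict of last positions) by a direct scan
-- that rechecks each length-markerLen window for distinctness; equivalence is proved for all inputs.

-- ===== PORT A =====
def findMsgStartGo (markerLen : Int) : List (Int × Char) → PySem.Dict Char Int → Int → Int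
  | [], _, _ => -1
  | (i, right) :: rest, charPos, windowStart =>
    let windowStart' :=
      match charPos.get? right with
      | some p => if p ≥ windowStart then p + 1 else windowStart
      | none => windowStart
    let charPos' := charPos.insert right i
    let windowEnd := i + 1
    if windowEnd - windowStart' = markerLen then windowEnd
    else findMsgStartGo markerLen rest charPos' windowStart'

def findMsgStart (data : String) (markerLen : Int) : Int :=
  findMsgStartGo markerLen (PySem.List.enumerate data.toList 0) PySem.Dict.empty 0

-- ===== PORT B =====
def findMsgStartAltGo (l : List Char) (markerLen : Int) : List Int → Int
  | [] => -1
  | i :: rest =>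
    if ((PySem.Set.ofList (PySem.List.slice l (some (i - markerLen)) (some i))).length : Int) = markerLen
    then i
    else findMsgStartAltGo l markerLen rest

def findMsgStart_alt (data : String) (markerLen : Int) : Int :=
  if markerLen ≤ 0 then -1
  else findMsgStartAltGo data.toList markerLen
        (PySem.List.pyRange markerLen ((data.toList.length : Int) + 1) 1)

-- ===== PRECONDITION & SPEC =====
def Spec_findMsgStart (data : String) (markerLen : Int) (out : Int) : Prop := out = findMsgStart_alt data markerLen
instance (data : String) (markerLen : Int) (out : Int) : Decidable (Spec_findMsgStart data markerLen out) := by unfold Spec_findMsgStart; infer_instance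

-- ===== CLAIM (what is proved, stated in full; the proofs are below) =====
def Claim_equal_findMsgStart : Prop := ∀ (data : String) (markerLen : Int), Dom_findMsgStart data markerLen → Spec_findMsgStart data markerLen (findMsgStart data markerLen)

-- ===== LEMMAS AND PROOFS =====

-- index of the last occurrence of c among the first k characters of l, if any
def lastOcc? (l : List Char) : Nat → Char → Option Nat
  | 0, _ => none
  | k+1, c => if l.getD k ' ' = c then some k else lastOcc? l k c

-- A's window_start after having processed the first k characters
def wsN (l : List Char) : Nat → Nat
  | 0 => 0
  | k+1 =>
    match lastOcc? l k (l.getD k ' ') with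
    | some p => if wsN l k ≤ p then p + 1 else wsN l k
    | none => wsN l k

lemma lastOcc?_lt {l : List Char} {k : Nat} {c : Char} {p : Nat}
    (h : lastOcc? l k c = some p) : p < k := by
  induction k with
  | zero => simp [lastOcc?] at h
  | succ k ih =>
    unfold lastOcc? at h
    split at h
    · cases h; omega
    · exact Nat.lt_succ_of_lt (ih h)

lemma lastOcc?_getD {l : List Char} {k : Nat} {c : Char} {p : Nat}
    (h : lastOcc? l k c = some p) : l.getD p ' ' = c := by
  induction k with
  | zero => simp [lastOcc?] at h
  | succ k ih =>
    unfold lastOcc? at h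
    split at h
    · cases h; assumption
    · exact ih h

lemma lastOcc?_last {l : List Char} {k : Nat} {c : Char} {p : Nat}
    (h : lastOcc? l k c = some p) : ∀ j, p < j → j < k → l.getD j ' ' ≠ c := by
  induction k with
  | zero => simp [lastOcc?] at h
  | succ k ih =>
    unfold lastOcc? at h
    split at h
    · cases h
      intro j h1 h2
      omega
    · rename_i hne
      intro j h1 h2
      rcases Nat.lt_or_ge j k with hjk | hjk
      · exact ih h j h1 hjk
      · have : j = k := by omega
        subst this; exact hne
  
lemma lastOcc?_none {l : List Char} {k : Nat} {c : Char}
    (h : lastOcc? l k c = none) : ∀ j, j < k → l.getD j ' ' ≠ c := by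
  induction k with
  | zero => intro j hj; omega
  | succ k ih =>
    unfold lastOcc? at h
    split at h
    · simp at h
    · rename_i hne
      intro j hj
      rcases Nat.lt_or_ge j k with hjk | hjk
      · exact ih h j hjk
      · have : j = k := by omega
        subst this; exact hne

lemma wsN_le (l : List Char) (k : Nat) : wsN l k ≤ k := by
  induction k with
  | zero => simp [wsN]
  | succ k ih =>
    unfold wsN
    split
    · rename_i p hp
      have := lastOcc?_lt hp
      split <;> omega
    · omega

lemma wsN_lt (l : List Char) (k : Nat) (hk : 0 < k) : wsN l k < k := by
  cases k with
  | zero => omega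
  | succ k =>
    unfold wsN
    have := wsN_le l k
    split
    · rename_i p hp
      have := lastOcc?_lt hp
      split <;> omega
    · omega

lemma wsN_mono (l : List Char) (k : Nat) : wsN l k ≤ wsN l (k+1) := by
  conv_rhs => rw [wsN]
  split
  · split <;> omega
  · omega

-- the window l[s:k] as a list
def win (l : List Char) (s k : Nat) : List Char := (l.drop s).take (k - s)

lemma win_succ (l : List Char) (s k : Nat) (hs : s ≤ k) (hk : k < l.length) :
    win l s (k+1) = win l s k ++ [l.getD k ' '] := by
  unfold win
  have h1 : k + 1 - s = (k - s) + 1 := by omega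
  rw [h1, List.take_succ]
  have h2 : (l.drop s)[k - s]? = some (l.getD k ' ') := by
    rw [List.getElem?_drop]
    have hsk : s + (k - s) = k := by omega
    rw [hsk, List.getElem?_eq_getElem hk, List.getD_eq_getElem _ _ hk]
  rw [h2]
  rfl

lemma mem_win_iff {l : List Char} {s k : Nat} (hk : k ≤ l.length) {x : Char} :
    x ∈ win l s k ↔ ∃ j, s ≤ j ∧ j < k ∧ l.getD j ' ' = x := by
  unfold win
  constructor
  · intro hx
    rw [List.mem_iff_getElem] at hx
    obtain ⟨i, hi, hval⟩ := hx
    simp only [List.length_take, List.length_drop, lt_min_iff] at hi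
    refine ⟨s + i, by omega, by omega, ?_⟩
    rw [List.getD_eq_getElem _ _ (by omega)]
    rw [List.getElem_take, List.getElem_drop] at hval
    exact hval
  · rintro ⟨j, hsj, hjk, hval⟩
    rw [List.mem_iff_getElem]
    have hjl : j < l.length := by omega
    refine ⟨j - s, ?_, ?_⟩
    · simp only [List.length_take, List.length_drop, lt_min_iff]
      omega
    · rw [List.getElem_take, List.getElem_drop]
      rw [List.getD_eq_getElem _ _ hjl] at hval
      simp only [show s + (j - s) = j from by omega]
      exact hval

-- restriction: a later-starting window of a nodup window is nodup
lemma win_nodup_mono {l : List Char} {s s' k : Nat} (hss : s ≤ s')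
    (h : (win l s k).Nodup) : (win l s' k).Nodup := by
  rcases Nat.lt_or_ge k s' with h1 | h1
  · unfold win
    have : k - s' = 0 := by omega
    simp [this]
  · have e : win l s' k = (win l s k).drop (s' - s) := by
      unfold win
      rw [List.drop_take, List.drop_drop]
      have e1 : k - s - (s' - s) = k - s' := by omega
      rw [e1, show s + (s' - s) = s' from by omega]
    rw [e]
    exact h.sublist (List.drop_sublist _ _)

-- a window avoiding c stays duplicate-free when c is appended
lemma win_append_nodup {l : List Char} {s k : Nat} {c : Char} (hk : k ≤ l.length)
    (hnd : (win l s k).Nodup) (hnc : ∀ j, s ≤ j → j < k → l.getD j ' ' ≠ c) :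
    (win l s k ++ [c]).Nodup := by
  rw [List.nodup_append]
  refine ⟨hnd, List.nodup_singleton c, ?_⟩
  intro a ha b hb
  rw [List.mem_singleton] at hb
  subst hb
  rw [mem_win_iff hk] at ha
  obtain ⟨j, h1, h2, h3⟩ := ha
  rw [← h3]
  exact hnc j h1 h2

-- C1 and C2: the window starting at wsN is the longest duplicate-free window ending at k
lemma win_wsN_aux (l : List Char) : ∀ k, k ≤ l.length →
    (win l (wsN l k) k).Nodup ∧ (∀ s, s < wsN l k → ¬ (win l s k).Nodup) := by
  intro k
  induction k with
  | zero =>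
    intro _
    refine ⟨by simp [win, wsN], ?_⟩
    intro s hs
    simp [wsN] at hs
  | succ k ih =>
    intro hk1
    have hk : k < l.length := hk1
    obtain ⟨C1, C2⟩ := ih (Nat.le_of_lt hk)
    have hwle := wsN_le l k
    -- the common 'window start unchanged' step
    have unchanged : (∀ j, wsN l k ≤ j → j < k → l.getD j ' ' ≠ l.getD k ' ') →
        wsN l (k+1) = wsN l k →
        (win l (wsN l (k+1)) (k+1)).Nodup ∧
          (∀ s, s < wsN l (k+1) → ¬ (win l s (k+1)).Nodup) := by
      intro hnc hw
      rw [hw]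
      constructor
      · rw [win_succ l _ k hwle hk]
        exact win_append_nodup (Nat.le_of_lt hk) C1 hnc
      · intro s hs hnd
        have hsk : s ≤ k := by omega
        rw [win_succ l s k hsk hk] at hnd
        exact C2 s hs (hnd.sublist (List.sublist_append_left _ _))
    rcases hO : lastOcc? l k (l.getD k ' ') with _ | p
    · exact unchanged (fun j _ hj => lastOcc?_none hO j hj)
        (by conv_lhs => rw [wsN, hO])
    · have hplt := lastOcc?_lt hO
      have hpc := lastOcc?_getD hO
      have hlast := lastOcc?_last hO
      rcases Nat.lt_or_ge p (wsN l k) with hpw | hpw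
      · refine unchanged (fun j hj1 hj2 => hlast j (by omega) hj2)
          (by conv_lhs => rw [wsN, hO]; simp [show ¬ wsN l k ≤ p from by omega])
      · have hw : wsN l (k+1) = p + 1 := by
          conv_lhs => rw [wsN, hO]
          simp [hpw]
        rw [hw]
        constructor
        · rw [win_succ l (p+1) k (by omega) hk]
          exact win_append_nodup (Nat.le_of_lt hk)
            (win_nodup_mono (by omega) C1)
            (fun j hj1 hj2 => hlast j (by omega) hj2)
        · intro s hs hnd
          have hlen : (win l s (k+1)).length = k + 1 - s := by
            unfold win
            rw [List.length_take, List.length_drop]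
            omega
          have hi1 : p - s < (win l s (k+1)).length := by omega
          have hi2 : k - s < (win l s (k+1)).length := by omega
          have hv1 : (win l s (k+1))[p - s] = l.getD k ' ' := by
            unfold win
            rw [List.getElem_take, List.getElem_drop]
            simp only [show s + (p - s) = p from by omega]
            rw [List.getD_eq_getElem _ _ (by omega), List.getD_eq_getElem _ _ hk] at hpc
            rw [List.getD_eq_getElem _ _ hk]
            exact hpc
          have hv2 : (win l s (k+1))[k - s] = l.getD k ' ' := by
            unfold win
            rw [List.getElem_take, List.getElem_drop]
            simp only [show s + (k - s) = k from by omega]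
            rw [List.getD_eq_getElem _ _ hk]
          have := (hnd.getElem_inj_iff (hi := hi1) (hj := hi2)).mp (by rw [hv1, hv2])
          omega

-- key: distinctness of the last m characters ↔ the maximal window reaches back m
lemma win_nodup_iff (l : List Char) (mN k : Nat) (hm : 1 ≤ mN) (hmk : mN ≤ k)
    (hk : k ≤ l.length) :
    (win l (k - mN) k).Nodup ↔ mN ≤ k - wsN l k := by
  obtain ⟨C1, C2⟩ := win_wsN_aux l k hk
  have hwle := wsN_le l k
  constructor
  · intro h
    by_contra hcon
    push_neg at hcon
    exact C2 (k - mN) (by omega) h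
  · intro h
    exact win_nodup_mono (by omega) C1

-- scanning functions expressed through wsN
def firstHitEq (l : List Char) (m : Int) (k : Nat) : Int :=
  if _h : k < l.length then
    (if ((k : Int) + 1) - (wsN l (k+1) : Int) = m then (k : Int) + 1 else firstHitEq l m (k+1))
  else -1
termination_by l.length - k

def firstHitGe (l : List Char) (m : Int) (k : Nat) : Int :=
  if _h : k ≤ l.length then
    (if m ≤ (k : Int) - (wsN l k : Int) then (k : Int) else firstHitGe l m (k+1))
  else -1
termination_by l.length + 1 - k

-- A's loop computes firstHitEq
lemma aGo_eq (l : List Char) (m : Int) (k : Nat) (hk : k ≤ l.length)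
    (cp : PySem.Dict Char Int)
    (hcp : ∀ c, cp.get? c = (lastOcc? l k c).map Int.ofNat) :
    findMsgStartGo m (PySem.List.enumerate (l.drop k) (k : Int)) cp ((wsN l k : Int))
      = firstHitEq l m k := by
  by_cases h : k < l.length
  · rw [List.drop_eq_getElem_cons h, PySem.List.enumerate_cons]
    have hgd : l.getD k ' ' = l[k] := List.getD_eq_getElem _ _ h
    simp only [findMsgStartGo]
    rw [hcp]
    have hws' :
        (match (lastOcc? l k l[k]).map Int.ofNat with
          | some p => if p ≥ ((wsN l k : Nat) : Int) then p + 1 else ((wsN l k : Nat) : Int)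
          | none => ((wsN l k : Nat) : Int)) = ((wsN l (k+1) : Nat) : Int) := by
      conv_rhs => rw [wsN, hgd]
      cases hO : lastOcc? l k l[k] with
      | none => simp
      | some p =>
        simp only [Option.map_some, Int.ofNat_eq_natCast, ge_iff_le, Nat.cast_le]
        by_cases hp : wsN l k ≤ p
        · rw [if_pos hp, if_pos hp]
          push_cast
          ring
        · rw [if_neg hp, if_neg hp]
    rw [hws']
    have hcp' : ∀ c, (cp.insert l[k] (k:Int)).get? c
        = (lastOcc? l (k+1) c).map Int.ofNat := by
      intro c
      rw [PySem.Dict.get?_insert]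
      conv_rhs => rw [lastOcc?, hgd]
      by_cases hc : c = l[k]
      · simp [hc]
      · rw [if_neg hc, if_neg (fun h => hc h.symm)]
        exact hcp c
    have hrest : PySem.List.enumerate (l.drop (k+1)) ((k:Int) + 1)
        = PySem.List.enumerate (l.drop (k+1)) (((k+1 : Nat)) : Int) := by
      push_cast
      ring_nf
    rw [hrest]
    rw [aGo_eq l m (k+1) (by omega) _ hcp']
    conv_rhs => rw [firstHitEq]
    rw [dif_pos h]
  · have hnil : l.drop k = [] := by
      rw [List.drop_eq_nil_iff]
      omega
    rw [hnil, PySem.List.enumerate_nil]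
    rw [firstHitEq, dif_neg h]
    rfl
termination_by l.length - k

lemma setlen_eq_iff_nodup (w : List Char) :
    (PySem.Set.ofList w).length = w.length ↔ w.Nodup := by
  constructor
  · intro h
    have hfs : (PySem.Set.ofList w).toFinset = w.toFinset := by
      ext x
      simp [List.mem_toFinset, PySem.Set.mem_ofList]
    have h1 : w.dedup.length = w.length := by
      have c1 := List.card_toFinset (PySem.Set.ofList w)
      have c2 := List.card_toFinset w
      rw [(PySem.Set.nodup_ofList w).dedup] at c1
      rw [hfs, c2] at c1
      omega
    have := (List.dedup_sublist w).eq_of_length h1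
    rw [← this]
    exact List.nodup_dedup w
  · intro h
    rw [PySem.Set.ofList_eq_self_of_nodup _ h]

-- B's loop computes firstHitGe
lemma bGo_eq (l : List Char) (m : Int) (hm : 1 ≤ m) (k : Nat) (hmk : m ≤ (k : Int)) :
    findMsgStartAltGo l m (PySem.List.pyRange (k : Int) ((l.length : Int) + 1) 1)
      = firstHitGe l m k := by
  have hmN : ((m.toNat : Nat) : Int) = m := Int.toNat_of_nonneg (by omega)
  have hmk' : m.toNat ≤ k := by omega
  by_cases h : k ≤ l.length
  · rw [PySem.List.pyRange_one_cons (by push_cast; omega)]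
    rw [findMsgStartAltGo]
    have hslice : PySem.List.slice l (some ((k:Int) - m)) (some (k:Int))
        = win l (k - m.toNat) k := by
      rw [show (k:Int) - m = (((k - m.toNat : Nat)) : Int) from by push_cast; omega]
      rw [PySem.List.slice_natCast]
      unfold win
      rw [show k - (k - m.toNat) = m.toNat from by omega]
    have hwinlen : (win l (k - m.toNat) k).length = m.toNat := by
      unfold win
      rw [List.length_take, List.length_drop]
      omega
    have hcond : (((PySem.Set.ofList (PySem.List.slice l (some ((k:Int) - m)) (some (k:Int)))).length : Int) = m)
        ↔ (m ≤ (k : Int) - ((wsN l k : Nat) : Int)) := by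
      rw [hslice]
      have hle := wsN_le l k
      constructor
      · intro hset
        have : (PySem.Set.ofList (win l (k - m.toNat) k)).length = (win l (k - m.toNat) k).length := by
          rw [hwinlen]
          omega
        have hnd := (setlen_eq_iff_nodup _).mp this
        have := (win_nodup_iff l m.toNat k (by omega) hmk' h).mp hnd
        push_cast
        omega
      · intro hge
        have hnd := (win_nodup_iff l m.toNat k (by omega) hmk' h).mpr (by push_cast at hge; omega)
        have := (setlen_eq_iff_nodup (win l (k - m.toNat) k)).mpr hnd
        rw [this, hwinlen]
        omega
    rw [firstHitGe, dif_pos h]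
    by_cases hc : m ≤ (k : Int) - ((wsN l k : Nat) : Int)
    · rw [if_pos (hcond.mpr hc), if_pos hc]
    · rw [if_neg (fun hx => hc (hcond.mp hx)), if_neg hc]
      rw [show (k:Int) + 1 = (((k+1 : Nat)) : Int) from by push_cast; ring]
      exact bGo_eq l m hm (k+1) (by omega)
  · rw [PySem.List.pyRange_one_eq_nil (by push_cast; omega)]
    rw [findMsgStartAltGo, firstHitGe, dif_neg h]
termination_by l.length + 1 - k

lemma firstHitEq_eq_ge (l : List Char) (m : Int) :
    ∀ k : Nat, ((k : Int) - (wsN l k : Int) < m) → firstHitEq l m k = firstHitGe l m (k+1) := by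
  intro k
  induction hn : l.length - k generalizing k with
  | zero =>
    intro hlt
    rw [firstHitEq, dif_neg (by omega), firstHitGe, dif_neg (by omega)]
  | succ n ih =>
    intro hlt
    have h : k < l.length := by omega
    rw [firstHitEq, dif_pos h, firstHitGe, dif_pos (by omega)]
    have hmono := wsN_mono l k
    have hle := wsN_le l (k+1)
    by_cases hc : m ≤ ((k:Int) + 1) - ((wsN l (k+1) : Nat) : Int)
    · rw [if_pos (by push_cast at hlt hc ⊢; omega), if_pos (by push_cast at hc ⊢; omega)]
      push_cast
      ring
    · rw [if_neg (by push_cast at hc ⊢; omega), if_neg (by push_cast at hc ⊢; omega)]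
      exact ih (k+1) (by push_cast at hc ⊢; omega) (by omega)

lemma firstHitGe_skip (l : List Char) (m : Int) :
    ∀ k : Nat, (k : Int) < m → firstHitGe l m k = firstHitGe l m (k+1) := by
  intro k hk
  rw [firstHitGe]
  split
  · have hle := wsN_le l k
    rw [if_neg (by push_cast; omega)]
  · rw [firstHitGe, dif_neg (by omega)]

lemma firstHitEq_nonpos (l : List Char) (m : Int) (hm : m ≤ 0) :
    ∀ k, firstHitEq l m k = -1 := by
  intro k
  induction hn : l.length - k generalizing k with
  | zero => rw [firstHitEq, dif_neg (by omega)]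
  | succ n ih =>
    have h : k < l.length := by omega
    rw [firstHitEq, dif_pos h]
    have hlt := wsN_lt l (k+1) (Nat.succ_pos k)
    rw [if_neg (by push_cast; omega)]
    exact ih (k+1) (by omega)

lemma firstHitGe_upto (l : List Char) (m : Int) (mN : Nat) (hmN : (mN : Int) = m) :
    ∀ k : Nat, k ≤ mN → firstHitGe l m k = firstHitGe l m mN := by
  intro k
  induction hn : mN - k generalizing k with
  | zero =>
    intro hk
    rw [show k = mN from by omega]
  | succ n ih =>
    intro hk
    rw [firstHitGe_skip l m k (by omega)]
    exact ih (k+1) (by omega) (by omega)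

-- ===== VERDICT (by name: the statement is the Claim_ definition above) =====
theorem findMsgStart_spec : Claim_equal_findMsgStart := by
  intro data m _
  unfold Spec_findMsgStart findMsgStart findMsgStart_alt
  have hA : findMsgStartGo m (PySem.List.enumerate data.toList 0) PySem.Dict.empty 0
      = firstHitEq data.toList m 0 := by
    have h := aGo_eq data.toList m 0 (Nat.zero_le _) PySem.Dict.empty
      (fun c => by simp [PySem.Dict.get?_empty, lastOcc?])
    simpa [wsN] using h
  rw [hA]
  by_cases hm : m ≤ 0
  · rw [if_pos hm, firstHitEq_nonpos data.toList m hm 0]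
  · rw [if_neg hm]
    have hmN : ((m.toNat : Nat) : Int) = m := Int.toNat_of_nonneg (by omega)
    have h1 : firstHitEq data.toList m 0 = firstHitGe data.toList m 1 :=
      firstHitEq_eq_ge data.toList m 0 (by simp [wsN]; omega)
    have h2 : firstHitGe data.toList m 1 = firstHitGe data.toList m m.toNat :=
      firstHitGe_upto data.toList m m.toNat hmN 1 (by omega)
    have hB := bGo_eq data.toList m (by omega) m.toNat (by omega)
    have hpr : PySem.List.pyRange m ((data.toList.length : Int) + 1) 1
        = PySem.List.pyRange ((m.toNat : Nat) : Int) ((data.toList.length : Int) + 1) 1 := by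
      rw [hmN]
    rw [h1, h2, hpr, hB]
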